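-- pv_equiv track=rewrite | github.com/promptdriven/pdd | context/split/3/postprocess.py | find_section
-- ===== SOURCE A (Python) =====
-- def find_section(lines, start_index=0, sub_section=False):
--     sections = []
--     i = start_index
--     while i < len(lines):
--         line = lines[i].strip()
--         if line.startswith('```'):
--             # Start of a code block
--             if len(line) > 3:
--                 # Extract the language from the line
--                 code_language = line[3:].strip()
--                 start_line = i
--                 i += 1
--                 # Find the end of the code block
--                 while i < len(lines) and not lines[i].strip().startswith('```'):
--                     i += 1
--                 if i < len(lines):
--                     end_line = i
--                     if not sub_section:
--                         sections.append((code_language, start_line, end_line))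
--                     else:
--                         return []
--             else:
--                 # End of a code block without a language
--                 if sub_section:
--                     return []
--         i += 1
--     return sections
-- ===== SOURCE B (Python) =====
-- def find_section(lines, start_index=0, sub_section=False):
--     # Flat single-pass state machine instead of nested while loops.
--     if sub_section:
--         return []
--     sections = []
--     in_block = False
--     lang = None
--     start = 0
--     i = start_index
--     n = len(lines)
--     while i < n:
--         line = lines[i].strip()
--         if line.startswith('```'):
--             if in_block:
--                 sections.append((lang, start, i))
--                 in_block = False
--             elif len(line) > 3:
--                 in_block = True
--                 lang = line[3:].strip()
--                 start = i
--         i += 1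
--     return sections
-- ===== Notes on version B (the rewrite author's own statement) =====
-- stated objective: simpler
-- what changed: Replaced A's nested while loops (outer scan plus inner closing-fence scan with post-checks) by a flat single-pass state machine with an in_block flag, and hoisted the sub_section case to an immediate 'return []' since A can never accumulate sections when sub_section is true.
import Mathlib
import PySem

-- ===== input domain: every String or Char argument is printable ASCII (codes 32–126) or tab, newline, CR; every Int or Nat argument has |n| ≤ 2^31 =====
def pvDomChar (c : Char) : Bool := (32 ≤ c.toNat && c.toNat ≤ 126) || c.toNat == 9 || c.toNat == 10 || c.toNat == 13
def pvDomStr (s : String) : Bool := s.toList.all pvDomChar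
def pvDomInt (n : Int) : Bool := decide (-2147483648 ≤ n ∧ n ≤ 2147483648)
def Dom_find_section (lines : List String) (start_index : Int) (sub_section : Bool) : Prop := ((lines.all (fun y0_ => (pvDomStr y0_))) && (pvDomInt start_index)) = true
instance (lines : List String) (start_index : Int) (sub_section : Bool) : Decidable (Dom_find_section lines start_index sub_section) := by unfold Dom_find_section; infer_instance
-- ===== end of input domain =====

-- B replaces A's nested while loops by a flat single-pass state machine (and returns []
-- immediately when sub_section is true, as A provably always does); return values agree on
-- every input where A returns (Pre_); no speed claim.

-- ===== PORT A =====
-- line = lines[i].strip(); the "" default is never reached inside Pre_ (there -len <= i)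
def pvLineAt (lines : List String) (i : Int) : String :=
  PySem.Str.strip ((PySem.List.pyGet? lines i).getD "")

-- code_language = line[3:].strip()
def pvLang (lines : List String) (i : Int) : String :=
  PySem.Str.strip (PySem.Str.slice (pvLineAt lines i) (some 3) none)

-- inner 'while i < len(lines) and not lines[i].strip().startswith("```")': returns the final i
def pvFindEnd (lines : List String) (i : Int) : Int :=
  if _h : i < (lines.length : Int) then
    if PySem.Str.startswith (pvLineAt lines i) "```" then i
    else pvFindEnd lines (i + 1)
  else i
termination_by ((lines.length : Int) - i).toNat
decreasing_by omega

theorem pvFindEnd_ge (lines : List String) (i : Int) : i <= pvFindEnd lines i := by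
  unfold pvFindEnd
  split
  · split
    · omega
    · have := pvFindEnd_ge lines (i + 1); omega
  · omega
termination_by ((lines.length : Int) - i).toNat
decreasing_by omega

-- outer while loop of A, accumulator 'sections'
def pvLoopA (lines : List String) (sub_section : Bool)
    (sections : List (String × Int × Int)) (i : Int) : List (String × Int × Int) :=
  if _h : i < (lines.length : Int) then
    if PySem.Str.startswith (pvLineAt lines i) "```" then
      if PySem.Str.len (pvLineAt lines i) > 3 then
        if _hj : pvFindEnd lines (i + 1) < (lines.length : Int) then
          if sub_section then []
          else pvLoopA lines sub_section
            (sections ++ [(pvLang lines i, i, pvFindEnd lines (i + 1))])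
            (pvFindEnd lines (i + 1) + 1)
        else pvLoopA lines sub_section sections (pvFindEnd lines (i + 1) + 1)
      else
        if sub_section then [] else pvLoopA lines sub_section sections (i + 1)
    else pvLoopA lines sub_section sections (i + 1)
  else sections
termination_by ((lines.length : Int) - i).toNat
decreasing_by
  · have := pvFindEnd_ge lines (i + 1); omega
  · have := pvFindEnd_ge lines (i + 1); omega
  · omega
  · omega

def find_section (lines : List String) (start_index : Int) (sub_section : Bool) :
    List (String × Int × Int) :=
  pvLoopA lines sub_section [] start_index

-- ===== PORT B =====
-- flat state machine: st = none when not in a block, some (lang, start) when in one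
def pvLoopB (lines : List String) (i : Int) (st : Option (String × Int))
    (acc : List (String × Int × Int)) : List (String × Int × Int) :=
  if _h : i < (lines.length : Int) then
    if PySem.Str.startswith (pvLineAt lines i) "```" then
      match st with
      | some (lang, start) => pvLoopB lines (i + 1) none (acc ++ [(lang, start, i)])
      | none =>
        if PySem.Str.len (pvLineAt lines i) > 3 then
          pvLoopB lines (i + 1) (some (pvLang lines i, i)) acc
        else pvLoopB lines (i + 1) none acc
    else pvLoopB lines (i + 1) st acc
  else acc
termination_by ((lines.length : Int) - i).toNat
decreasing_by all_goals omega

def find_section_alt (lines : List String) (start_index : Int) (sub_section : Bool) :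
    List (String × Int × Int) :=
  if sub_section then [] else pvLoopB lines start_index none []

-- ===== PRECONDITION & SPEC =====
-- Pre_ excludes exactly the inputs where Python A raises IndexError: start_index < -len(lines).
def Pre_find_section (lines : List String) (start_index : Int) (sub_section : Bool) : Prop :=
  -(lines.length : Int) ≤ start_index
instance (lines : List String) (start_index : Int) (sub_section : Bool) : Decidable (Pre_find_section lines start_index sub_section) := by unfold Pre_find_section; infer_instance

def pvWitness_find_section : List String × Int × Bool := (["```py", "x = 1", "```"], 0, false)

def Spec_find_section (lines : List String) (start_index : Int) (sub_section : Bool) (out : List (String × Int × Int)) : Prop := out = find_section_alt lines start_index sub_section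
instance (lines : List String) (start_index : Int) (sub_section : Bool) (out : List (String × Int × Int)) : Decidable (Spec_find_section lines start_index sub_section out) := by unfold Spec_find_section; infer_instance

-- ===== CLAIM (what is proved, stated in full; the proofs are below) =====
def Claim_equal_find_section : Prop := ∀ (lines : List String) (start_index : Int) (sub_section : Bool), Dom_find_section lines start_index sub_section → Pre_find_section lines start_index sub_section → Spec_find_section lines start_index sub_section (find_section lines start_index sub_section)

-- ===== LEMMAS AND PROOFS =====

theorem pvFindEnd_stop (lines : List String) (i : Int) (h1 : i < (lines.length : Int))
    (h2 : PySem.Str.startswith (pvLineAt lines i) "```" = true) :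
    pvFindEnd lines i = i := by
  rw [pvFindEnd, dif_pos h1, if_pos h2]

theorem pvFindEnd_next (lines : List String) (i : Int) (h1 : i < (lines.length : Int))
    (h2 : ¬ PySem.Str.startswith (pvLineAt lines i) "```" = true) :
    pvFindEnd lines i = pvFindEnd lines (i + 1) := by
  rw [pvFindEnd, dif_pos h1, if_neg h2]

theorem pvFindEnd_end (lines : List String) (i : Int) (h1 : ¬ i < (lines.length : Int)) :
    pvFindEnd lines i = i := by
  rw [pvFindEnd, dif_neg h1]

-- with sub_section = true, A never appends, so from an empty accumulator it returns []
theorem pvLoopA_true (lines : List String) (i : Int) : pvLoopA lines true [] i = [] := by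
  rw [pvLoopA]
  by_cases h1 : i < (lines.length : Int)
  · rw [dif_pos h1]
    by_cases h2 : PySem.Str.startswith (pvLineAt lines i) "```" = true
    · rw [if_pos h2]
      by_cases h3 : PySem.Str.len (pvLineAt lines i) > 3
      · rw [if_pos h3]
        by_cases h4 : pvFindEnd lines (i + 1) < (lines.length : Int)
        · rw [dif_pos h4, if_pos rfl]
        · rw [dif_neg h4]
          exact pvLoopA_true lines _
      · rw [if_neg h3, if_pos rfl]
    · rw [if_neg h2]
      exact pvLoopA_true lines _
  · rw [dif_neg h1]
termination_by ((lines.length : Int) - i).toNat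
decreasing_by
  · have := pvFindEnd_ge lines (i + 1); omega
  · omega

-- B's in-block state scans to the closing fence found by pvFindEnd
theorem pvLoopB_inBlock (lines : List String) (i : Int) (lang : String) (start : Int)
    (acc : List (String × Int × Int)) :
    pvLoopB lines i (some (lang, start)) acc =
      if pvFindEnd lines i < (lines.length : Int) then
        pvLoopB lines (pvFindEnd lines i + 1) none (acc ++ [(lang, start, pvFindEnd lines i)])
      else acc := by
  rw [pvLoopB]
  by_cases h1 : i < (lines.length : Int)
  · rw [dif_pos h1]
    by_cases h2 : PySem.Str.startswith (pvLineAt lines i) "```" = true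
    · rw [if_pos h2, pvFindEnd_stop lines i h1 h2, if_pos h1]
    · rw [if_neg h2, pvFindEnd_next lines i h1 h2]
      exact pvLoopB_inBlock lines (i + 1) lang start acc
  · rw [dif_neg h1, pvFindEnd_end lines i h1, if_neg h1]
termination_by ((lines.length : Int) - i).toNat
decreasing_by omega

-- one step of B when not in a block, at a fence line
theorem pvLoopB_step_none (lines : List String) (i : Int) (acc : List (String × Int × Int))
    (h1 : i < (lines.length : Int))
    (h2 : PySem.Str.startswith (pvLineAt lines i) "```" = true) :
    pvLoopB lines i none acc =
      if PySem.Str.len (pvLineAt lines i) > 3 then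
        pvLoopB lines (i + 1) (some (pvLang lines i, i)) acc
      else pvLoopB lines (i + 1) none acc := by
  conv_lhs => rw [pvLoopB.eq_def]
  rw [dif_pos h1, if_pos h2]

-- one step of B at a non-fence line (any state)
theorem pvLoopB_step_skip (lines : List String) (i : Int) (st : Option (String × Int))
    (acc : List (String × Int × Int)) (h1 : i < (lines.length : Int))
    (h2 : ¬ PySem.Str.startswith (pvLineAt lines i) "```" = true) :
    pvLoopB lines i st acc = pvLoopB lines (i + 1) st acc := by
  conv_lhs => rw [pvLoopB.eq_def]
  rw [dif_pos h1, if_neg h2]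

-- main invariant: A's nested loop equals B's flat machine (sub_section = false)
theorem pvLoop_eq (lines : List String) (i : Int) (acc : List (String × Int × Int)) :
    pvLoopA lines false acc i = pvLoopB lines i none acc := by
  by_cases h1 : i < (lines.length : Int)
  · by_cases h2 : PySem.Str.startswith (pvLineAt lines i) "```" = true
    · rw [pvLoopA, dif_pos h1, if_pos h2, pvLoopB_step_none lines i acc h1 h2]
      by_cases h3 : PySem.Str.len (pvLineAt lines i) > 3
      · rw [if_pos h3, if_pos h3, pvLoopB_inBlock]
        by_cases h4 : pvFindEnd lines (i + 1) < (lines.length : Int)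
        · rw [dif_pos h4, if_pos h4, if_neg (by simp : ¬ (false = true))]
          exact pvLoop_eq lines _ _
        · rw [dif_neg h4, if_neg h4, pvLoopA]
          have h5 : ¬ (pvFindEnd lines (i + 1) + 1 < (lines.length : Int)) := by
            have := pvFindEnd_ge lines (i + 1); omega
          rw [dif_neg h5]
      · rw [if_neg h3, if_neg h3, if_neg (by simp : ¬ (false = true))]
        exact pvLoop_eq lines _ _
    · rw [pvLoopA, dif_pos h1, if_neg h2, pvLoopB_step_skip lines i none acc h1 h2]
      exact pvLoop_eq lines _ _
  · rw [pvLoopA, dif_neg h1]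
    conv_rhs => rw [pvLoopB.eq_def]
    rw [dif_neg h1]
termination_by ((lines.length : Int) - i).toNat
decreasing_by
  · have := pvFindEnd_ge lines (i + 1); omega
  · omega
  · omega

-- ===== VERDICT (by name: the statement is the Claim_ definition above) =====
theorem find_section_spec : Claim_equal_find_section := by
  intro lines start_index sub_section _ _
  unfold Spec_find_section find_section find_section_alt
  cases sub_section
  · simpa using pvLoop_eq lines start_index []
  · simpa using pvLoopA_true lines start_index
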